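-- pv_equiv track=rewrite | github.com/lukeshimanuki/tics | autocomplete.py | voicing_parallel_intervals_cost
-- ===== SOURCE A (Python) =====
-- def voicing_parallel_intervals_cost(prev, this):
--     for i in 'satb':
--         if i not in this or i not in prev:
--             return 0
--     cost = 0
--     for i in 'satb':
--         for j in 'satb':
--             if i != j:
--                 if this[i][0] - prev[i][0] == this[j][0] - prev[j][0]:
--                     if (this[i][0] - this[j][0]) % 12 in [7, 0]:
--                         cost += 10
--     return cost
-- ===== SOURCE B (Python) =====
-- def voicing_parallel_intervals_cost(prev, this):
--     voices = 'satb'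
--     if any(v not in this or v not in prev for v in voices):
--         return 0
--     pairs = [('s', 'a'), ('s', 't'), ('s', 'b'), ('a', 't'), ('a', 'b'), ('t', 'b')]
--     cost = 0
--     for (i, j) in pairs:
--         if this[i][0] - prev[i][0] != this[j][0] - prev[j][0]:
--             continue
--         d = (this[i][0] - this[j][0]) % 12
--         if d == 0:
--             cost += 20
--         elif d == 7 or d == 5:
--             cost += 10
--     return cost
-- ===== Notes on version B (the rewrite author's own statement) =====
-- stated objective: alternative
-- what changed: B scans the 6 unordered voice pairs once instead of A's 16 ordered pairs, scoring an octave as 20 and a fifth in either direction (residue 7 or 5 mod 12) as 10, after the same presence guard.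
import Mathlib
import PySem

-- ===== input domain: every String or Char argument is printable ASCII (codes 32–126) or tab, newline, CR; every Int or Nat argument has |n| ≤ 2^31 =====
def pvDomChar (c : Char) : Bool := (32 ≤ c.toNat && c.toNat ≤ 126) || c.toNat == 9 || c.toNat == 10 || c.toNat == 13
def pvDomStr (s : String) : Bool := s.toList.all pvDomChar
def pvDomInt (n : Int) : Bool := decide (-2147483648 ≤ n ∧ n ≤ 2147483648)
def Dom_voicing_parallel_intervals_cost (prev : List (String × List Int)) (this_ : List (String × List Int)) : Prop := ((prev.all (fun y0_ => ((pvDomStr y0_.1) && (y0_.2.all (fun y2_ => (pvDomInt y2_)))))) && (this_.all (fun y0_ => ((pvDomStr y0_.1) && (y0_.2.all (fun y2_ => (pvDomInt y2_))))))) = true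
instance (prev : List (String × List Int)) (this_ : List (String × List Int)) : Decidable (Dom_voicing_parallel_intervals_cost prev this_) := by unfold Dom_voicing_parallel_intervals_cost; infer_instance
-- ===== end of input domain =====

-- B scores each UNORDERED pair once (20 for an octave, 10 for a fifth in either direction via residues 7/5)
-- instead of A's scan over all 16 ordered voice pairs: same value, half the pair scan (objective: alternative).
-- A mutates nothing; equivalence is about the return value.

-- ===== PORT A =====
-- this[k][0] on the paths A reaches (all four voices present, Pre_ gives nonempty lists)
def pvNoteA (d : List (String × List Int)) (k : String) : Int :=
  (PySem.List.pyGet? ((PySem.Dict.mk d).getD k []) 0).getD 0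

def voicing_parallel_intervals_cost (prev : List (String × List Int)) (this_ : List (String × List Int)) : Int :=
  -- for i in 'satb': if i not in this or i not in prev: return 0
  if (["s", "a", "t", "b"].all fun k =>
      (PySem.Dict.mk this_).contains k && (PySem.Dict.mk prev).contains k) then
    -- cost = 0; for i in 'satb': for j in 'satb': …
    ["s", "a", "t", "b"].foldl (fun cost i =>
      ["s", "a", "t", "b"].foldl (fun cost j =>
        if i ≠ j then
          if pvNoteA this_ i - pvNoteA prev i = pvNoteA this_ j - pvNoteA prev j then
            if PySem.Int.mod (pvNoteA this_ i - pvNoteA this_ j) 12 ∈ ([7, 0] : List Int) then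
              cost + 10
            else cost
          else cost
        else cost) cost) 0
  else 0

-- ===== PORT B =====
def pvNoteB (d : List (String × List Int)) (k : String) : Int :=
  (PySem.List.pyGet? ((PySem.Dict.mk d).getD k []) 0).getD 0

def voicing_parallel_intervals_cost_alt (prev : List (String × List Int)) (this_ : List (String × List Int)) : Int :=
  if (["s", "a", "t", "b"].any fun v =>
      !(PySem.Dict.mk this_).contains v || !(PySem.Dict.mk prev).contains v) then 0
  else
    [("s", "a"), ("s", "t"), ("s", "b"), ("a", "t"), ("a", "b"), ("t", "b")].foldl (fun cost p =>
      if pvNoteB this_ p.1 - pvNoteB prev p.1 ≠ pvNoteB this_ p.2 - pvNoteB prev p.2 then cost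
      else
        let d := PySem.Int.mod (pvNoteB this_ p.1 - pvNoteB this_ p.2) 12
        if d = 0 then cost + 20
        else if d = 7 ∨ d = 5 then cost + 10
        else cost) 0

-- ===== PRECONDITION & SPEC =====
-- Pre_ excludes exactly the inputs where Python A raises IndexError: all four voices present in
-- both dicts but some of their note lists empty (this[v][0] out of range).
def Pre_voicing_parallel_intervals_cost (prev : List (String × List Int)) (this_ : List (String × List Int)) : Prop :=
  (∀ k ∈ (["s", "a", "t", "b"] : List String),
      (PySem.Dict.mk this_).contains k = true ∧ (PySem.Dict.mk prev).contains k = true) →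
  (∀ k ∈ (["s", "a", "t", "b"] : List String),
      (PySem.Dict.mk this_).getD k [] ≠ [] ∧ (PySem.Dict.mk prev).getD k [] ≠ [])
instance (prev : List (String × List Int)) (this_ : List (String × List Int)) : Decidable (Pre_voicing_parallel_intervals_cost prev this_) := by unfold Pre_voicing_parallel_intervals_cost; infer_instance

def pvWitness_voicing_parallel_intervals_cost : (List (String × List Int)) × (List (String × List Int)) :=
  ([("s", [12]), ("a", [7]), ("t", [0]), ("b", [-12])],
   [("s", [14]), ("a", [9]), ("t", [2]), ("b", [-10])])

def Spec_voicing_parallel_intervals_cost (prev : List (String × List Int)) (this_ : List (String × List Int)) (out : Int) : Prop := out = voicing_parallel_intervals_cost_alt prev this_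
instance (prev : List (String × List Int)) (this_ : List (String × List Int)) (out : Int) : Decidable (Spec_voicing_parallel_intervals_cost prev this_ out) := by unfold Spec_voicing_parallel_intervals_cost; infer_instance

-- ===== CLAIM (what is proved, stated in full; the proofs are below) =====
def Claim_equal_voicing_parallel_intervals_cost : Prop := ∀ (prev : List (String × List Int)) (this_ : List (String × List Int)), Dom_voicing_parallel_intervals_cost prev this_ → Pre_voicing_parallel_intervals_cost prev this_ → Spec_voicing_parallel_intervals_cost prev this_ (voicing_parallel_intervals_cost prev this_)

-- ===== LEMMAS AND PROOFS =====

theorem pvNoteB_eq_pvNoteA : pvNoteB = pvNoteA := rfl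

-- linearize one step of A's inner loop: "cost += 10 under three guards" as "cost + term"
theorem pvStepA (c : Int) (P Q R : Prop) [Decidable P] [Decidable Q] [Decidable R] :
    (if P then if Q then if R then c + 10 else c else c else c)
      = c + (if P then if Q then if R then (10 : Int) else 0 else 0 else 0) := by
  split_ifs <;> omega

-- linearize one step of B's loop
theorem pvStepB (c : Int) (P Q R : Prop) [Decidable P] [Decidable Q] [Decidable R] :
    (if P then c else if Q then c + 20 else if R then c + 10 else c)
      = c + (if P then 0 else if Q then 20 else if R then (10 : Int) else 0) := by
  split_ifs <;> omega

-- the two ordered-pair contributions of A for a pair {i, j} equal B's single contribution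
theorem pvPairEq (di dj ti tj : Int) :
    (if di = dj then if PySem.Int.mod (ti - tj) 12 ∈ ([7, 0] : List Int) then (10 : Int) else 0 else 0)
      + (if dj = di then if PySem.Int.mod (tj - ti) 12 ∈ ([7, 0] : List Int) then (10 : Int) else 0 else 0)
      = (if di = dj then
           (if PySem.Int.mod (ti - tj) 12 = 0 then (20 : Int)
            else if PySem.Int.mod (ti - tj) 12 = 7 ∨ PySem.Int.mod (ti - tj) 12 = 5 then 10
            else 0)
         else 0) := by
  have h12 : (0 : Int) < 12 := by norm_num
  simp only [List.mem_cons, List.not_mem_nil, or_false,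
    PySem.Int.mod_eq_emod_of_pos h12]
  split_ifs <;> omega

-- ===== VERDICT (by name: the statement is the Claim_ definition above) =====
theorem voicing_parallel_intervals_cost_spec : Claim_equal_voicing_parallel_intervals_cost := by
  intro prev this_ _ _
  unfold Spec_voicing_parallel_intervals_cost
  unfold voicing_parallel_intervals_cost voicing_parallel_intervals_cost_alt
  rw [pvNoteB_eq_pvNoteA]
  by_cases hall : (["s", "a", "t", "b"].all fun k =>
      (PySem.Dict.mk this_).contains k && (PySem.Dict.mk prev).contains k) = true
  · simp only [List.all_cons, List.all_nil, Bool.and_true, Bool.and_eq_true] at hall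
    obtain ⟨⟨hs1, hs2⟩, ⟨ha1, ha2⟩, ⟨ht1, ht2⟩, hb1, hb2⟩ := hall
    simp only [List.all_cons, List.all_nil, List.any_cons, List.any_nil,
      hs1, hs2, ha1, ha2, ht1, ht2, hb1, hb2, Bool.and_self, Bool.not_true,
      Bool.or_self, if_true]
    simp only [List.foldl_cons, List.foldl_nil, pvStepA, pvStepB]
    simp only [ne_eq, ite_not, String.reduceEq, Bool.false_eq_true, if_false, reduceIte]
    have h1 := pvPairEq (pvNoteA this_ "s" - pvNoteA prev "s") (pvNoteA this_ "a" - pvNoteA prev "a") (pvNoteA this_ "s") (pvNoteA this_ "a")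
    have h2 := pvPairEq (pvNoteA this_ "s" - pvNoteA prev "s") (pvNoteA this_ "t" - pvNoteA prev "t") (pvNoteA this_ "s") (pvNoteA this_ "t")
    have h3 := pvPairEq (pvNoteA this_ "s" - pvNoteA prev "s") (pvNoteA this_ "b" - pvNoteA prev "b") (pvNoteA this_ "s") (pvNoteA this_ "b")
    have h4 := pvPairEq (pvNoteA this_ "a" - pvNoteA prev "a") (pvNoteA this_ "t" - pvNoteA prev "t") (pvNoteA this_ "a") (pvNoteA this_ "t")
    have h5 := pvPairEq (pvNoteA this_ "a" - pvNoteA prev "a") (pvNoteA this_ "b" - pvNoteA prev "b") (pvNoteA this_ "a") (pvNoteA this_ "b")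
    have h6 := pvPairEq (pvNoteA this_ "t" - pvNoteA prev "t") (pvNoteA this_ "b" - pvNoteA prev "b") (pvNoteA this_ "t") (pvNoteA this_ "b")
    linarith
  · rw [if_neg hall]
    have hany : (["s", "a", "t", "b"].any fun v =>
        !(PySem.Dict.mk this_).contains v || !(PySem.Dict.mk prev).contains v) = true := by
      simp only [List.all_cons, List.all_nil, List.any_cons, List.any_nil, Bool.and_true,
        Bool.or_false, Bool.and_eq_true, Bool.or_eq_true, Bool.not_eq_true'] at hall ⊢
      simp only [← Bool.not_eq_true]
      tauto
    rw [if_pos hany]
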